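-- pv_equiv track=rewrite | github.com/pmilovanov/pdfmagick | src/app.py | arrange_pages_cut_and_stack
-- ===== SOURCE A (Python) =====
-- from typing import Dict, Any, Optional, Tuple, List
-- import math
--
-- def arrange_pages_cut_and_stack(n: int) -> List[Optional[int]]:
--     """Arrange pages for cut-and-stack double-sided printing.
--
--     Args:
--         n: Total number of pages
--
--     Returns:
--         Flat array where every 4 elements represent one sheet:
--         [front_left, front_right, back_left, back_right, ...]
--         Page numbers are 1-indexed, None represents blank pages
--     """
--     sheets_count = math.ceil(n / 4)
--     output = []
--
--     for i in range(sheets_count):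
--         # Calculate page numbers for each position
--         front_left = 2 * i + 1
--         front_right = 2 * sheets_count + 2 * i + 1
--         back_left = 2 * sheets_count + 2 * i + 2
--         back_right = 2 * i + 2
--
--         # Append positions, using None for out-of-range pages
--         output.append(front_left if front_left <= n else None)
--         output.append(front_right if front_right <= n else None)
--         output.append(back_left if back_left <= n else None)
--         output.append(back_right if back_right <= n else None)
--
--     return output
-- ===== SOURCE B (Python) =====
-- def arrange_pages_cut_and_stack(n: int):
--     """Same result as A, built by materializing the two half-range tables and
--     interleaving them sheet by sheet instead of computing four per-sheet
--     formulas."""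
--     s = -(-n // 4)  # ceil(n / 4)
--     first = [v if v <= n else None for v in range(1, 2 * s + 1)]
--     second = [v if v <= n else None for v in range(2 * s + 1, 4 * s + 1)]
--     out = []
--     it_f, it_s = iter(first), iter(second)
--     for f0 in it_f:
--         f1, s0, s1 = next(it_f), next(it_s), next(it_s)
--         out += [f0, s0, s1, f1]
--     return out
-- ===== Notes on version B (the rewrite author's own statement) =====
-- stated objective: alternative
-- what changed: B materializes the first-half and second-half page ranges as masked tables and interleaves them two-at-a-time per sheet, instead of A's four per-sheet arithmetic formulas inside one index loop.
import Mathlib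
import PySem

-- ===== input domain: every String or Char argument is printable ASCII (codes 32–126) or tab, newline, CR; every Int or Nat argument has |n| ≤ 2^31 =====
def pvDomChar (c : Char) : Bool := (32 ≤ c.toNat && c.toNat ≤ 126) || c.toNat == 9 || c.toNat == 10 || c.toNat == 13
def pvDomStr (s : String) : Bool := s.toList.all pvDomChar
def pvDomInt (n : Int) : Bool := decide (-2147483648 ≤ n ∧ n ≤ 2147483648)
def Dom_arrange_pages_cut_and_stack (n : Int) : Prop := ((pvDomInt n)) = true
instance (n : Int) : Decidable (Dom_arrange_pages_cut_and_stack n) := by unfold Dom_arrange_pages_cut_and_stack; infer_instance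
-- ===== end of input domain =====

-- ===== PORT A =====
-- B builds the two half-range tables and interleaves them; A computes four
-- per-sheet formulas in one index loop. Objective: alternative decomposition.
-- math.ceil(n/4): exact as -((-n)//4) since n/4 is an exact double for |n| ≤ 2^31.
def arrange_pages_cut_and_stack (n : Int) : List (Option Int) :=
  let sheets_count : Int := -(PySem.Int.floordiv (-n) 4)
  (PySem.List.pyRange 0 sheets_count 1).foldl (fun output i =>
    let front_left := 2 * i + 1
    let front_right := 2 * sheets_count + 2 * i + 1
    let back_left := 2 * sheets_count + 2 * i + 2
    let back_right := 2 * i + 2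
    output ++ [if front_left ≤ n then some front_left else none]
           ++ [if front_right ≤ n then some front_right else none]
           ++ [if back_left ≤ n then some back_left else none]
           ++ [if back_right ≤ n then some back_right else none]) []

-- ===== PORT B =====
-- the while loop of Source B: consume two entries of each table per sheet
def pvInterleave : List (Option Int) → List (Option Int) → List (Option Int)
  | f0 :: f1 :: fs, s0 :: s1 :: ss => f0 :: s0 :: s1 :: f1 :: pvInterleave fs ss
  | _, _ => []

def arrange_pages_cut_and_stack_alt (n : Int) : List (Option Int) :=
  let s : Int := -(PySem.Int.floordiv (-n) 4)
  let first := (PySem.List.pyRange 1 (2 * s + 1) 1).map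
    (fun v => if v ≤ n then some v else none)
  let second := (PySem.List.pyRange (2 * s + 1) (4 * s + 1) 1).map
    (fun v => if v ≤ n then some v else none)
  pvInterleave first second

-- ===== PRECONDITION & SPEC =====
def Spec_arrange_pages_cut_and_stack (n : Int) (out : List (Option Int)) : Prop := out = arrange_pages_cut_and_stack_alt n
instance (n : Int) (out : List (Option Int)) : Decidable (Spec_arrange_pages_cut_and_stack n out) := by unfold Spec_arrange_pages_cut_and_stack; infer_instance

-- ===== CLAIM (what is proved, stated in full; the proofs are below) =====
def Claim_equal_arrange_pages_cut_and_stack : Prop := ∀ (n : Int), Dom_arrange_pages_cut_and_stack n → Spec_arrange_pages_cut_and_stack n (arrange_pages_cut_and_stack n)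

-- ===== LEMMAS AND PROOFS =====

-- common normal form: the list of sheets, one chunk of four per sheet
def pvChunks (mk : Int → Option Int) : Nat → Int → Int → List (Option Int)
  | 0, _, _ => []
  | k + 1, a, b => mk a :: mk b :: mk (b + 1) :: mk (a + 1) :: pvChunks mk k (a + 2) (b + 2)

theorem pvInterleave_ranges (mk : Int → Option Int) :
    ∀ (k : Nat) (a b : Int),
      pvInterleave ((PySem.List.pyRange a (a + 2 * (k : Int)) 1).map mk)
        ((PySem.List.pyRange b (b + 2 * (k : Int)) 1).map mk) = pvChunks mk k a b := by
  intro k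
  induction k with
  | zero =>
    intro a b
    rw [PySem.List.pyRange_one_eq_nil (by omega), PySem.List.pyRange_one_eq_nil (by omega)]
    rfl
  | succ k ih =>
    intro a b
    rw [PySem.List.pyRange_one_cons (a := a) (by omega),
        PySem.List.pyRange_one_cons (a := a + 1) (by omega),
        PySem.List.pyRange_one_cons (a := b) (by omega),
        PySem.List.pyRange_one_cons (a := b + 1) (by omega)]
    have h1 : a + 2 * ((k : Int) + 1) = (a + 2) + 2 * (k : Int) := by ring
    have h2 : b + 2 * ((k : Int) + 1) = (b + 2) + 2 * (k : Int) := by ring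
    push_cast
    rw [h1, h2]
    simp only [List.map_cons, pvInterleave, pvChunks]
    rw [show a + 1 + 1 = a + 2 from by ring, show b + 1 + 1 = b + 2 from by ring, ih (a + 2) (b + 2)]

theorem pvFlatMap_chunks (n S : Int) :
    ∀ (k : Nat) (j : Int),
      (PySem.List.pyRange j (j + (k : Int)) 1).flatMap
        (fun i => [if 2 * i + 1 ≤ n then some (2 * i + 1) else none,
                   if 2 * S + 2 * i + 1 ≤ n then some (2 * S + 2 * i + 1) else none,
                   if 2 * S + 2 * i + 2 ≤ n then some (2 * S + 2 * i + 2) else none,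
                   if 2 * i + 2 ≤ n then some (2 * i + 2) else none])
      = pvChunks (fun v => if v ≤ n then some v else none) k (2 * j + 1) (2 * S + 2 * j + 1) := by
  intro k
  induction k with
  | zero =>
    intro j
    rw [PySem.List.pyRange_one_eq_nil (by omega)]
    rfl
  | succ k ih =>
    intro j
    rw [PySem.List.pyRange_one_cons (by omega)]
    have h1 : j + ((k : Int) + 1) = (j + 1) + (k : Int) := by ring
    push_cast
    rw [h1]
    simp only [List.flatMap_cons, pvChunks]
    have := ih (j + 1)
    have e1 : 2 * (j + 1) + 1 = 2 * j + 1 + 2 := by ring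
    have e2 : 2 * S + 2 * (j + 1) + 1 = 2 * S + 2 * j + 1 + 2 := by ring
    rw [e1, e2] at this
    rw [this]
    have e3 : 2 * S + 2 * j + 1 + 1 = 2 * S + 2 * j + 2 := by ring
    simp only [e3, show 2 * j + 1 + 1 = 2 * j + 2 from by ring]
    rfl

-- ===== VERDICT (by name: the statement is the Claim_ definition above) =====
theorem arrange_pages_cut_and_stack_spec : Claim_equal_arrange_pages_cut_and_stack := by
  intro n _
  unfold Spec_arrange_pages_cut_and_stack arrange_pages_cut_and_stack arrange_pages_cut_and_stack_alt
  set S : Int := -(PySem.Int.floordiv (-n) 4) with hS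
  simp only []
  by_cases h : 0 ≤ S
  · -- S sheets, S = ↑k
    obtain ⟨k, hk⟩ : ∃ k : Nat, S = (k : Int) := ⟨S.toNat, by omega⟩
    have hfold :
        (PySem.List.pyRange 0 S 1).foldl (fun output i =>
          output ++ [if 2 * i + 1 ≤ n then some (2 * i + 1) else none]
                 ++ [if 2 * S + 2 * i + 1 ≤ n then some (2 * S + 2 * i + 1) else none]
                 ++ [if 2 * S + 2 * i + 2 ≤ n then some (2 * S + 2 * i + 2) else none]
                 ++ [if 2 * i + 2 ≤ n then some (2 * i + 2) else none]) []
        = (PySem.List.pyRange 0 S 1).flatMap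
            (fun i => [if 2 * i + 1 ≤ n then some (2 * i + 1) else none,
                       if 2 * S + 2 * i + 1 ≤ n then some (2 * S + 2 * i + 1) else none,
                       if 2 * S + 2 * i + 2 ≤ n then some (2 * S + 2 * i + 2) else none,
                       if 2 * i + 2 ≤ n then some (2 * i + 2) else none]) := by
      have hfun : (fun (output : List (Option Int)) i =>
          output ++ [if 2 * i + 1 ≤ n then some (2 * i + 1) else none]
                 ++ [if 2 * S + 2 * i + 1 ≤ n then some (2 * S + 2 * i + 1) else none]
                 ++ [if 2 * S + 2 * i + 2 ≤ n then some (2 * S + 2 * i + 2) else none]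
                 ++ [if 2 * i + 2 ≤ n then some (2 * i + 2) else none])
          = fun (output : List (Option Int)) i =>
          output ++ [if 2 * i + 1 ≤ n then some (2 * i + 1) else none,
                     if 2 * S + 2 * i + 1 ≤ n then some (2 * S + 2 * i + 1) else none,
                     if 2 * S + 2 * i + 2 ≤ n then some (2 * S + 2 * i + 2) else none,
                     if 2 * i + 2 ≤ n then some (2 * i + 2) else none] := by
        funext o i; simp
      rw [hfun, PySem.List.foldl_append_eq_flatMap]
      simp
    rw [hfold]
    have hA := pvFlatMap_chunks n S k 0
    have hB := pvInterleave_ranges (fun v => if v ≤ n then some v else none) k 1 (2 * S + 1)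
    have r1 : (0 : Int) + (k : Int) = S := by omega
    have r2 : (1 : Int) + 2 * (k : Int) = 2 * S + 1 := by omega
    have r3 : 2 * S + 1 + 2 * (k : Int) = 4 * S + 1 := by omega
    rw [r1] at hA
    rw [r2, r3] at hB
    rw [hA, hB]
    norm_num
  · -- no sheets: everything empty
    rw [PySem.List.pyRange_one_eq_nil (a := 0) (by omega),
        PySem.List.pyRange_one_eq_nil (a := 1) (by omega)]
    simp [pvInterleave]
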